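-- pv_equiv track=rewrite | github.com/charlch/Advent-of-Code | 2021/day17b.py | x_gets_into_range
-- ===== SOURCE A (Python) =====
-- def x_gets_into_range(x_traj, x_min,x_max):
--     x=0
--     while x_traj!=0:
--         x+=x_traj
--         if x_traj>0:
--             x_traj-=1
--         elif x_traj<0:
--             x_traj+=1
--
--         if x_min<=x<=x_max:
--             return True
--     return False
-- ===== SOURCE B (Python) =====
-- def x_gets_into_range(x_traj, x_min, x_max):
--     # Closed form + binary search instead of step-by-step simulation.
--     if x_traj == 0:
--         return False
--     if x_traj < 0:
--         # mirror: positions are exactly the negated positive-case positions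
--         x_traj, x_min, x_max = -x_traj, -x_max, -x_min
--     n = x_traj
--     def S(k):
--         # position after k steps (1 <= k <= n), strictly increasing up to k = n
--         return k * n - k * (k - 1) // 2
--     if S(n) < x_min:
--         return False
--     lo, hi = 1, n
--     while lo < hi:
--         mid = (lo + hi) // 2
--         if S(mid) >= x_min:
--             hi = mid
--         else:
--             lo = mid + 1
--     return S(lo) <= x_max
-- ===== Notes on version B (the rewrite author's own statement) =====
-- stated objective: faster
-- what changed: Replaces A's step-by-step simulation of the decelerating trajectory with the closed-form position S_k = k*n - k*(k-1)//2 (after mirroring negative velocities), binary-searching for the first step that reaches the near edge of the range and checking that single position.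
import Mathlib
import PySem

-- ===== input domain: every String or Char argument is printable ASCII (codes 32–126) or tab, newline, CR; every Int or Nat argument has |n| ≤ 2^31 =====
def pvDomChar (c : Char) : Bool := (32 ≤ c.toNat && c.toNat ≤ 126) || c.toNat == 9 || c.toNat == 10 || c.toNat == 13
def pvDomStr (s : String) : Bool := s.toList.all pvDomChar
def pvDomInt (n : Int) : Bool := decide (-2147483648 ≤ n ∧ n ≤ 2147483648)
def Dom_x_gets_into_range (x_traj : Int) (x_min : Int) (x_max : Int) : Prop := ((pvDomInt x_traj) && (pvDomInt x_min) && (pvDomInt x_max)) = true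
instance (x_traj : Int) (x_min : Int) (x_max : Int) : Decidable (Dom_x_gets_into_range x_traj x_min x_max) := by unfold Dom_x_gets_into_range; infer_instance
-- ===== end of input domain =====

-- B replaces A's step-by-step simulation by the closed-form position S_k plus a binary search (objective: faster).

-- ===== PORT A =====
-- the while loop of A with state (x_traj, x); fuel = |x_traj| iterations, exactly enough
def pvXLoop : Nat → Int → Int → Int → Int → Bool
  | 0, _, _, _, _ => false
  | fuel + 1, x_traj, x, x_min, x_max =>
    if x_traj = 0 then false
    else if x_min ≤ x + x_traj ∧ x + x_traj ≤ x_max then true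
    else pvXLoop fuel
      (if x_traj > 0 then x_traj - 1 else if x_traj < 0 then x_traj + 1 else x_traj)
      (x + x_traj) x_min x_max

def x_gets_into_range (x_traj : Int) (x_min : Int) (x_max : Int) : Bool :=
  pvXLoop x_traj.natAbs x_traj 0 x_min x_max

-- ===== PORT B =====
-- closed-form position after k steps with initial (positive) velocity n
def pvS (n : Int) (k : Int) : Int := k * n - PySem.Int.floordiv (k * (k - 1)) 2

-- binary search: first k in [lo, hi] with x_min ≤ pvS n k (caller ensures x_min ≤ pvS n hi);
-- fuel bounds the number of halvings (the interval shrinks each round)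
def pvBS : Nat → Int → Int → Int → Int → Int
  | 0, _, _, lo, _ => lo
  | fuel + 1, n, x_min, lo, hi =>
    if lo < hi then
      if x_min ≤ pvS n (PySem.Int.floordiv (lo + hi) 2) then
        pvBS fuel n x_min lo (PySem.Int.floordiv (lo + hi) 2)
      else
        pvBS fuel n x_min (PySem.Int.floordiv (lo + hi) 2 + 1) hi
    else lo

-- positive-velocity case: does any closed-form position land in [mn, mx]?
def pvCheck (n : Int) (mn : Int) (mx : Int) : Bool :=
  if pvS n n < mn then false
  else decide (pvS n (pvBS ((n - 1).toNat + 1) n mn 1 n) ≤ mx)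

def x_gets_into_range_alt (x_traj : Int) (x_min : Int) (x_max : Int) : Bool :=
  if x_traj = 0 then false
  else if x_traj < 0 then pvCheck (-x_traj) (-x_max) (-x_min)   -- mirrored trajectory
  else pvCheck x_traj x_min x_max

-- ===== PRECONDITION & SPEC =====
def Spec_x_gets_into_range (x_traj : Int) (x_min : Int) (x_max : Int) (out : Bool) : Prop := out = x_gets_into_range_alt x_traj x_min x_max
instance (x_traj : Int) (x_min : Int) (x_max : Int) (out : Bool) : Decidable (Spec_x_gets_into_range x_traj x_min x_max out) := by unfold Spec_x_gets_into_range; infer_instance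

-- ===== CLAIM (what is proved, stated in full; the proofs are below) =====
def Claim_equal_x_gets_into_range : Prop := ∀ (x_traj : Int) (x_min : Int) (x_max : Int), Dom_x_gets_into_range x_traj x_min x_max → Spec_x_gets_into_range x_traj x_min x_max (x_gets_into_range x_traj x_min x_max)

-- ===== LEMMAS AND PROOFS =====

-- arithmetic characterisation of pvS (k*(k-1) is even, so the floor division is exact)
theorem pvS_two (n k : Int) : 2 * pvS n k = 2 * (k * n) - k * (k - 1) := by
  have hdvd : (2 : Int) ∣ k * (k - 1) := by
    rcases Int.even_or_odd k with ⟨c, hc⟩ | ⟨c, hc⟩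
    · exact ⟨c * (k - 1), by rw [hc]; ring⟩
    · exact ⟨k * c, by rw [hc]; ring⟩
  obtain ⟨c, hc⟩ := hdvd
  unfold pvS
  rw [PySem.Int.floordiv_eq_ediv_of_pos (by norm_num), hc,
      Int.mul_ediv_cancel_left _ (by norm_num)]
  ring

theorem pvS_mono (n j k : Int) (_hj : 1 ≤ j) (hjk : j ≤ k) (hk : k ≤ n) :
    pvS n j ≤ pvS n k := by
  have h2j := pvS_two n j
  have h2k := pvS_two n k
  have key : 2 * (k * n) - k * (k - 1) - (2 * (j * n) - j * (j - 1))
      = (k - j) * (2 * n - (k + j - 1)) := by ring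
  have h1 : 0 ≤ (k - j) * (2 * n - (k + j - 1)) := mul_nonneg (by omega) (by omega)
  linarith

theorem pvS_one (n : Int) : pvS n 1 = n := by
  have h := pvS_two n 1
  have h1 : (1 : Int) * n = n := one_mul n
  linarith

-- shifting the velocity by one: position after k+1 steps at velocity n+1
theorem pvS_shift (n k : Int) : pvS (n + 1) (k + 1) = (n + 1) + pvS n k := by
  have h1 := pvS_two (n + 1) (k + 1)
  have h2 := pvS_two n k
  have key : 2 * ((k + 1) * (n + 1)) - (k + 1) * (k + 1 - 1)
      = 2 * (n + 1) + (2 * (k * n) - k * (k - 1)) := by ring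
  linarith

-- the loop on a nonnegative velocity hits the range iff some closed-form position does
theorem pvXLoop_pos (v : Nat) : ∀ (x x_min x_max : Int),
    pvXLoop v (v : Int) x x_min x_max = true ↔
      ∃ k : Int, 1 ≤ k ∧ k ≤ (v : Int) ∧ x_min ≤ x + pvS (v : Int) k ∧ x + pvS (v : Int) k ≤ x_max := by
  induction v with
  | zero =>
    intro x x_min x_max
    rw [pvXLoop]
    constructor
    · intro h; exact absurd h (by simp)
    · rintro ⟨k, hk1, hk2, _⟩
      simp only [Nat.cast_zero] at hk2
      omega
  | succ v ih =>
    intro x x_min x_max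
    rw [pvXLoop]
    have hv : ¬ ((v + 1 : Nat) : Int) = 0 := by push_cast; omega
    rw [if_neg hv]
    by_cases hr : x_min ≤ x + ((v + 1 : Nat) : Int) ∧ x + ((v + 1 : Nat) : Int) ≤ x_max
    · rw [if_pos hr]
      constructor
      · intro _
        refine ⟨1, le_refl _, by push_cast; omega, ?_, ?_⟩ <;> · rw [pvS_one]; omega
      · intro _; rfl
    · rw [if_neg hr]
      rw [if_pos (by push_cast; omega : ((v + 1 : Nat) : Int) > 0)]
      have hsimp : ((v + 1 : Nat) : Int) - 1 = (v : Int) := by push_cast; ring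
      rw [hsimp, ih]
      have hcast : ((v + 1 : Nat) : Int) = (v : Int) + 1 := by push_cast; ring
      rw [hcast] at hr ⊢
      constructor
      · rintro ⟨k, hk1, hk2, hlo, hhi⟩
        refine ⟨k + 1, by omega, by omega, ?_, ?_⟩ <;>
          · have h := pvS_shift (v : Int) k
            omega
      · rintro ⟨k, hk1, hk2, hlo, hhi⟩
        by_cases hk : k = 1
        · subst hk
          rw [pvS_one] at hlo hhi
          exact absurd ⟨by omega, by omega⟩ hr
        · refine ⟨k - 1, by omega, by omega, ?_, ?_⟩ <;>
            · have h := pvS_shift (v : Int) (k - 1)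
              rw [show k - 1 + 1 = k by ring] at h
              omega

-- the loop at velocity t mirrors the loop at -t with the range negated
theorem pvXLoop_mirror (f : Nat) : ∀ (t x x_min x_max : Int),
    pvXLoop f t x x_min x_max = pvXLoop f (-t) (-x) (-x_max) (-x_min) := by
  induction f with
  | zero => intro t x x_min x_max; rw [pvXLoop, pvXLoop]
  | succ f ih =>
    intro t x x_min x_max
    rw [pvXLoop, pvXLoop]
    by_cases h0 : t = 0
    · subst h0; norm_num
    · rw [if_neg h0, if_neg (by omega : ¬ -t = 0)]
      have hx' : -x + -t = -(x + t) := by ring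
      rw [hx']
      have hrange : (x_min ≤ x + t ∧ x + t ≤ x_max) ↔ (-x_max ≤ -(x + t) ∧ -(x + t) ≤ -x_min) := by
        omega
      by_cases hr : x_min ≤ x + t ∧ x + t ≤ x_max
      · rw [if_pos hr, if_pos (hrange.mp hr)]
      · rw [if_neg hr, if_neg (fun h => hr (hrange.mpr h))]
        rcases lt_trichotomy t 0 with ht | ht | ht
        · rw [if_neg (by omega), if_pos (by omega), if_pos (by omega)]
          rw [show -t - 1 = -(t + 1) by ring]
          exact ih (t + 1) (x + t) x_min x_max
        · omega
        · rw [if_pos ht, if_neg (by omega), if_pos (by omega)]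
          rw [show -t + 1 = -(t - 1) by ring]
          exact ih (t - 1) (x + t) x_min x_max

-- binary-search correctness: returns the least index in [lo, hi] whose position reaches x_min
theorem pvBS_correct (n x_min : Int) : ∀ (f : Nat) (lo hi : Int), 1 ≤ lo → lo ≤ hi → hi ≤ n →
    (hi - lo).toNat < f →
    x_min ≤ pvS n hi → (∀ k, 1 ≤ k → k < lo → pvS n k < x_min) →
    1 ≤ pvBS f n x_min lo hi ∧ pvBS f n x_min lo hi ≤ hi ∧
      x_min ≤ pvS n (pvBS f n x_min lo hi) ∧
      (∀ k, 1 ≤ k → k < pvBS f n x_min lo hi → pvS n k < x_min) := by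
  intro f
  induction f with
  | zero => intro lo hi _ _ _ hf _ _; omega
  | succ f ih =>
    intro lo hi hlo1 hlohi hhin hf hhi hbelow
    rw [pvBS]
    by_cases hlt : lo < hi
    · rw [if_pos hlt]
      have hmid := PySem.Int.floordiv_two_mid_bounds (lo := lo) (hi := hi) (by omega)
      have hmidlt : PySem.Int.floordiv (lo + hi) 2 < hi :=
        (PySem.Int.floordiv_lt_iff_lt_mul (by norm_num)).mpr (by omega)
      set mid := PySem.Int.floordiv (lo + hi) 2 with hmiddef
      by_cases hm : x_min ≤ pvS n mid
      · rw [if_pos hm]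
        obtain ⟨a, b, c, d⟩ := ih lo mid hlo1 (by omega) (by omega) (by omega) hm hbelow
        exact ⟨a, by omega, c, d⟩
      · rw [if_neg hm]
        refine ih (mid + 1) hi (by omega) (by omega) hhin (by omega) hhi ?_
        intro k hk1 hk2
        by_cases hk : k < lo
        · exact hbelow k hk1 hk
        · have : pvS n k ≤ pvS n mid := pvS_mono n k mid hk1 (by omega) (by omega)
          omega
    · rw [if_neg hlt]
      have heq : lo = hi := le_antisymm hlohi (not_lt.mp hlt)
      exact ⟨hlo1, by omega, by rw [heq]; exact hhi, hbelow⟩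

-- characterisation of B's positive-velocity check
theorem pvCheck_iff (n x_min x_max : Int) (hn : 1 ≤ n) :
    pvCheck n x_min x_max = true ↔
      ∃ k : Int, 1 ≤ k ∧ k ≤ n ∧ x_min ≤ pvS n k ∧ pvS n k ≤ x_max := by
  unfold pvCheck
  by_cases hend : pvS n n < x_min
  · rw [if_pos hend]
    simp only [Bool.false_eq_true, false_iff]
    rintro ⟨k, hk1, hk2, hlo, _⟩
    have : pvS n k ≤ pvS n n := pvS_mono n k n hk1 hk2 le_rfl
    omega
  · rw [if_neg hend]
    obtain ⟨hr1, hr2, hr3, hr4⟩ :=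
      pvBS_correct n x_min ((n - 1).toNat + 1) 1 n (le_refl _) hn le_rfl (by omega)
        (by omega) (by intro k hk1 hk2; omega)
    set r := pvBS ((n - 1).toNat + 1) n x_min 1 n with hrdef
    simp only [decide_eq_true_eq]
    constructor
    · intro h; exact ⟨r, hr1, hr2, hr3, h⟩
    · rintro ⟨k, hk1, hk2, hlo, hhi⟩
      have hrk : r ≤ k := by
        by_contra hc
        have := hr4 k hk1 (by omega)
        omega
      have : pvS n r ≤ pvS n k := pvS_mono n r k hr1 hrk hk2
      omega

-- ===== VERDICT (by name: the statement is the Claim_ definition above) =====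
theorem x_gets_into_range_spec : Claim_equal_x_gets_into_range := by
  intro x_traj x_min x_max _
  unfold Spec_x_gets_into_range x_gets_into_range x_gets_into_range_alt
  rcases lt_trichotomy x_traj 0 with ht | ht | ht
  · rw [if_neg (by omega : ¬ x_traj = 0), if_pos ht]
    rw [pvXLoop_mirror x_traj.natAbs x_traj 0 x_min x_max, show -(0:Int) = 0 from neg_zero]
    have hcast : x_traj.natAbs = ((-x_traj).toNat : Nat) := by omega
    have hcast2 : -x_traj = (((-x_traj).toNat : Nat) : Int) := by omega
    rw [hcast, hcast2, Int.toNat_natCast]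
    rw [Bool.eq_iff_iff, pvXLoop_pos (-x_traj).toNat 0 (-x_max) (-x_min),
        pvCheck_iff (((-x_traj).toNat : Nat) : Int) (-x_max) (-x_min) (by omega)]
    constructor
    · rintro ⟨k, h1, h2, h3, h4⟩; exact ⟨k, h1, h2, by omega, by omega⟩
    · rintro ⟨k, h1, h2, h3, h4⟩; exact ⟨k, h1, h2, by omega, by omega⟩
  · subst ht
    rw [if_pos rfl]
    rw [show (0:Int).natAbs = 0 from rfl, pvXLoop]
  · rw [if_neg (by omega : ¬ x_traj = 0), if_neg (by omega : ¬ x_traj < 0)]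
    have hcast : x_traj.natAbs = (x_traj.toNat : Nat) := by omega
    have hcast2 : x_traj = ((x_traj.toNat : Nat) : Int) := by omega
    rw [hcast, hcast2, Int.toNat_natCast]
    rw [Bool.eq_iff_iff, pvXLoop_pos x_traj.toNat 0 x_min x_max,
        pvCheck_iff ((x_traj.toNat : Nat) : Int) x_min x_max (by omega)]
    constructor
    · rintro ⟨k, h1, h2, h3, h4⟩; exact ⟨k, h1, h2, by omega, by omega⟩
    · rintro ⟨k, h1, h2, h3, h4⟩; exact ⟨k, h1, h2, by omega, by omega⟩
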